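-- pv_equiv track=rewrite | github.com/kekwait/py_course | py_course_practice/task3.py | three_words
-- ===== SOURCE A (Python) =====
-- def three_words(text: str):
--     text = text.split()
--     i = 0
--     result = [True] * len(text)
--     for word in text:
--         for letter in word:
--             if letter.isdigit():
--                 result[i] = False
--                 break
--         i += 1
--     counter = 0
--     for i in result:
--         if i == False:
--             counter = 0
--         if i:
--             counter += 1
--         if counter == 3:
--             return True
--     else:
--         return False
-- ===== SOURCE B (Python) =====
-- def three_words(text: str):
--     streak = 0
--     for word in text.split():
--         if any(c.isdigit() for c in word):
--             streak = 0
--         else: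
--             streak += 1
--             if streak == 3:
--                 return True
--     return False
-- ===== Notes on version B (the rewrite author's own statement) =====
-- stated objective: simpler
-- what changed: Replaces A's two-pass build-a-boolean-table-then-scan structure with one fused pass over the words maintaining only an integer streak counter with early return.
import Mathlib
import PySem

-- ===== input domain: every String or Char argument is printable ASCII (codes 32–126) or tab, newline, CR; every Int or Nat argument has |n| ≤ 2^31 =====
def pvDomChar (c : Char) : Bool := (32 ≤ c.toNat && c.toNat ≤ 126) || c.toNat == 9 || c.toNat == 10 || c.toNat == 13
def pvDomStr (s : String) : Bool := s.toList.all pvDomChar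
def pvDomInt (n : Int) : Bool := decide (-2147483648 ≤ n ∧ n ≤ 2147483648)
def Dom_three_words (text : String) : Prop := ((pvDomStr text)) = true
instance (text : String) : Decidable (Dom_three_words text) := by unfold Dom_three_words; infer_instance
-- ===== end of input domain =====

-- B fuses A's build-boolean-table-then-scan into one pass keeping only a streak counter; objective: simpler.


-- ===== PORT A =====
-- inner 'for letter in word: if letter.isdigit(): result[i] = False; break'
def aFlag (word : List Char) : Bool :=
  match word with
  | [] => true
  | c :: rest => if PySem.Chars.isdigit c then false else aFlag rest

-- second loop: 'counter = 0; for i in result: …' with early return True, else False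
def aScan (flags : List Bool) (counter : Nat) : Bool :=
  match flags with
  | [] => false
  | i :: rest =>
    let counter := if i == false then 0 else counter
    let counter := if i then counter + 1 else counter
    if counter == 3 then true else aScan rest counter

def three_words (text : String) : Bool :=
  aScan ((PySem.Str.split₀ text).map (fun w => aFlag w.toList)) 0

-- ===== PORT B =====
def bScan (words : List String) (streak : Nat) : Bool :=
  match words with
  | [] => false
  | w :: rest =>
    if w.toList.any PySem.Chars.isdigit then bScan rest 0
    else if streak + 1 == 3 then true else bScan rest (streak + 1)

def three_words_alt (text : String) : Bool :=
  bScan (PySem.Str.split₀ text) 0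

-- ===== PRECONDITION & SPEC =====
def Spec_three_words (text : String) (out : Bool) : Prop := out = three_words_alt text
instance (text : String) (out : Bool) : Decidable (Spec_three_words text out) := by unfold Spec_three_words; infer_instance

-- ===== CLAIM (what is proved, stated in full; the proofs are below) =====
def Claim_equal_three_words : Prop := ∀ (text : String), Dom_three_words text → Spec_three_words text (three_words text)

-- ===== LEMMAS AND PROOFS =====
theorem aFlag_eq (w : List Char) : aFlag w = ! w.any PySem.Chars.isdigit := by
  induction w with
  | nil => simp [aFlag]
  | cons c rest ih =>
    simp only [aFlag, List.any_cons]
    by_cases h : PySem.Chars.isdigit c <;> simp [h, ih]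

theorem aScan_eq_bScan (ws : List String) (c : Nat) :
    aScan (ws.map (fun w => aFlag w.toList)) c = bScan ws c := by
  induction ws generalizing c with
  | nil => simp [aScan, bScan]
  | cons w rest ih =>
    simp only [aFlag_eq] at ih
    simp only [List.map_cons, aScan, bScan, aFlag_eq]
    by_cases h : w.toList.any PySem.Chars.isdigit <;> simp [h, ih]

-- ===== VERDICT (by name: the statement is the Claim_ definition above) =====
theorem three_words_spec : Claim_equal_three_words := by
  intro text _
  unfold Spec_three_words three_words three_words_alt
  exact aScan_eq_bScan _ 0
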